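-- pv_equiv track=rewrite | github.com/Meghnak13/Early-Stage-Breast-Cancer-Detection-in-Mammogram-Scan-Images-using-Deep-Learning | Code/data_processing.py | calculate_gridsize
-- ===== SOURCE A (Python) =====
-- import math
--
-- def calculate_gridsize(plot_count):
--     # Used to determine the gridsize for plotting
--     # Handling for single plot
--     if plot_count == 1:
--         return plot_count, plot_count
--
--     # Used to calculate the value of nearest power of 2 which is greater than the number of plots
--     two_power = 2
--     while plot_count > two_power:
--         two_power = two_power * 2
--     size = int(math.log2(two_power))
--
--     # Handling for log value is 1 but number of plots is 2
--     if size == 1: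
--         return size, size+1
--     else:
--         return size, size
-- ===== SOURCE B (Python) =====
-- def calculate_gridsize(plot_count):
--     # Single plot
--     if plot_count == 1:
--         return plot_count, plot_count
--     # Anything <= 2 (including 2, 0, negatives) needs a 1x2 grid
--     if plot_count <= 2:
--         return 1, 2
--     # exponent of the smallest power of 2 >= plot_count, via integer bit_length
--     size = (plot_count - 1).bit_length()
--     return size, size
-- ===== Notes on version B (the rewrite author's own statement) =====
-- stated objective: simpler
-- what changed: Replaces the doubling while-loop plus float math.log2 with a closed-form integer computation: (plot_count-1).bit_length() gives the exponent of the smallest power of 2 not below plot_count, with a direct guard for the small/non-positive counts that the loop never iterates on.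
import Mathlib
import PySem

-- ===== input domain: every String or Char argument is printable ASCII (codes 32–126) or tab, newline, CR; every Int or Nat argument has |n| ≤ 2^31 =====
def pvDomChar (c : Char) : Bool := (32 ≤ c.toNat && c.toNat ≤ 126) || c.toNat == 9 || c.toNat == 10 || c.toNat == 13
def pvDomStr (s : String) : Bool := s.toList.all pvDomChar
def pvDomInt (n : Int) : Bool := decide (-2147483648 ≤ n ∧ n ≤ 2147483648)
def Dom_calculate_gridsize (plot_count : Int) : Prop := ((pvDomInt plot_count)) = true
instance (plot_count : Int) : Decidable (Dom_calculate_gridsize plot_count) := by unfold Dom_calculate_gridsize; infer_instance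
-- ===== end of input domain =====

-- B replaces A's doubling while-loop + float math.log2 with a direct integer bit_length closed form (objective: simpler).


-- ===== PORT A =====
-- the 'while plot_count > two_power: two_power *= 2' loop; carries 0 < two_power for termination
def pvLoopA (plot_count two_power : Int) (h : 0 < two_power) : Int :=
  if plot_count > two_power then pvLoopA plot_count (two_power * 2) (by omega) else two_power
termination_by (plot_count - two_power).toNat
decreasing_by omega

-- int(math.log2(n)): exact here because A only calls it on a positive power of two,
-- where math.log2 is exact; ported as integer log2 (exact on powers of two)
def pvIlog2 (n : Int) : Int :=
  if h : n ≤ 1 then 0 else 1 + pvIlog2 (n / 2)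
termination_by n.toNat
decreasing_by omega

def calculate_gridsize (plot_count : Int) : Int × Int :=
  if plot_count == 1 then (plot_count, plot_count)
  else
    let two_power := pvLoopA plot_count 2 (by omega)
    let size := pvIlog2 two_power
    if size == 1 then (size, size + 1) else (size, size)

-- ===== PORT B =====
-- Python int.bit_length, exact for n ≥ 0 (B only calls it with plot_count - 1 ≥ 2)
def pvBitLength (n : Int) : Int :=
  if h : n ≤ 0 then 0 else 1 + pvBitLength (n / 2)
termination_by n.toNat
decreasing_by omega

def calculate_gridsize_alt (plot_count : Int) : Int × Int :=
  if plot_count == 1 then (plot_count, plot_count)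
  else if plot_count ≤ 2 then (1, 2)
  else
    let size := pvBitLength (plot_count - 1)
    (size, size)

-- ===== PRECONDITION & SPEC =====
def Spec_calculate_gridsize (plot_count : Int) (out : Int × Int) : Prop := out = calculate_gridsize_alt plot_count
instance (plot_count : Int) (out : Int × Int) : Decidable (Spec_calculate_gridsize plot_count out) := by unfold Spec_calculate_gridsize; infer_instance

-- ===== CLAIM (what is proved, stated in full; the proofs are below) =====
def Claim_equal_calculate_gridsize : Prop := ∀ (plot_count : Int), Dom_calculate_gridsize plot_count → Spec_calculate_gridsize plot_count (calculate_gridsize plot_count)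

-- ===== LEMMAS AND PROOFS =====

theorem pvIlog2_pow (k : ℕ) : pvIlog2 ((2 : Int) ^ k) = k := by
  induction k with
  | zero => simp [pvIlog2]
  | succ k ih =>
      rw [pvIlog2]
      have h1 : ¬ ((2 : Int) ^ (k + 1) ≤ 1) := by
        have : (1 : Int) ≤ 2 ^ k := one_le_pow₀ (by norm_num)
        rw [pow_succ]; nlinarith
      have h2 : (2 : Int) ^ (k + 1) / 2 = 2 ^ k := by
        rw [pow_succ]; exact Int.mul_ediv_cancel _ (by norm_num)
      rw [dif_neg h1, h2, ih]; push_cast; ring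

theorem pvBitLength_spec (k : ℕ) : ∀ m : Int, 2 ^ k ≤ m → m < 2 ^ (k + 1) → pvBitLength m = k + 1 := by
  induction k with
  | zero =>
      intro m h1 h2
      have : m = 1 := by omega
      subst this
      rw [pvBitLength, dif_neg (by norm_num), pvBitLength]
      norm_num
  | succ k ih =>
      intro m h1 h2
      have hpos : (1 : Int) ≤ 2 ^ k := one_le_pow₀ (by norm_num)
      have h1' : (2 : Int) ^ k ≤ m / 2 := by
        rw [pow_succ] at h1; omega
      have h2' : m / 2 < (2 : Int) ^ (k + 1) := by
        rw [pow_succ] at h2; omega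
      rw [pvBitLength, dif_neg (by rw [pow_succ] at h1; nlinarith), ih (m / 2) h1' h2']
      push_cast; ring

-- loop characterization: starting from 2^(j+1), if 2^k < n ≤ 2^(k+1) and j ≤ k then the loop stops at 2^(k+1)
theorem pvLoopA_pow (k : ℕ) (n : Int) (hlo : 2 ^ k < n) (hhi : n ≤ 2 ^ (k + 1)) :
    ∀ j : ℕ, j ≤ k → pvLoopA n ((2 : Int) ^ (j + 1)) (by positivity) = 2 ^ (k + 1) := by
  intro j
  induction hd : k - j generalizing j with
  | zero =>
      intro hjk
      have : j = k := by omega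
      subst this
      rw [pvLoopA, if_neg (by omega)]
  | succ d ihd =>
      intro hjk
      have hjlt : j < k := by omega
      have hmono : (2 : Int) ^ (j + 1) ≤ 2 ^ k := pow_le_pow_right₀ (by norm_num) (by omega)
      rw [pvLoopA, if_pos (by omega)]
      have := ihd (j + 1) (by omega) (by omega)
      -- rewrite the recursive call's argument to a power
      convert this using 2

theorem calculate_gridsize_spec' (plot_count : Int) :
    calculate_gridsize plot_count = calculate_gridsize_alt plot_count := by
  unfold calculate_gridsize calculate_gridsize_alt
  by_cases h1 : plot_count = 1
  · simp [h1]
  · simp only [beq_iff_eq, if_neg h1]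
    by_cases h2 : plot_count ≤ 2
    · -- loop does not run: plot_count ≤ 2 = two_power, size = 1
      have hloop : pvLoopA plot_count 2 (by omega) = 2 := by
        rw [pvLoopA, if_neg (by omega)]
      have hlog : pvIlog2 (2 : Int) = 1 := by
        rw [pvIlog2, dif_neg (by norm_num), pvIlog2]; norm_num
      simp [hloop, hlog, h2]
    · -- plot_count ≥ 3: pick k with 2^k < plot_count ≤ 2^(k+1)
      rw [if_neg (show ¬ plot_count ≤ 2 by omega)]
      set n : ℕ := (plot_count - 1).toNat with hn
      have hn2 : 2 ≤ n := by omega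
      set k : ℕ := Nat.log 2 n with hk
      have hk1 : 1 ≤ k := Nat.log_pos (by norm_num) hn2
      have hlow : (2 : ℕ) ^ k ≤ n := Nat.pow_log_le_self 2 (by omega)
      have hhigh : n < 2 ^ (k + 1) := Nat.lt_pow_succ_log_self (by norm_num) n
      have hlowI : (2 : Int) ^ k ≤ plot_count - 1 := by
        have := hlow
        have : ((2 : ℕ) ^ k : Int) ≤ (n : Int) := by exact_mod_cast this
        push_cast at this ⊢; omega
      have hhighI : plot_count - 1 < (2 : Int) ^ (k + 1) := by
        have : ((n : ℕ) : Int) < ((2 : ℕ) ^ (k + 1) : Int) := by exact_mod_cast hhigh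
        push_cast at this ⊢; omega
      have hloop : pvLoopA plot_count 2 (by omega) = 2 ^ (k + 1) := by
        have := pvLoopA_pow k plot_count (by omega) (by omega) 0 (by omega)
        simpa using this
      have hlog : pvIlog2 (pvLoopA plot_count 2 (by omega)) = (k : Int) + 1 := by
        rw [hloop]
        have := pvIlog2_pow (k + 1)
        simpa using this
      have hbl : pvBitLength (plot_count - 1) = (k : Int) + 1 := by
        have := pvBitLength_spec k (plot_count - 1) hlowI hhighI
        simpa using this
      have hne : ¬ ((k : Int) + 1 = 1) := by
        have : (1 : Int) ≤ (k : Int) := by exact_mod_cast hk1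
        omega
      simp only [hlog, hbl]
      rw [if_neg hne]

-- ===== VERDICT (by name: the statement is the Claim_ definition above) =====
theorem calculate_gridsize_spec : Claim_equal_calculate_gridsize := by
  intro p _
  unfold Spec_calculate_gridsize
  exact calculate_gridsize_spec' p
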